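-- pv_equiv track=rewrite | github.com/andremedeiro/ufcg | prog1/exercicios/10Unidade/TimeCampeao/timecampeao.py | time_campeao
-- ===== SOURCE A (Python) =====
-- def time_campeao(dados):
--     campeao = []
--
--     maior = ''
--
--     for time in dados.keys():
--         if maior == '':
--             maior = time
--
--         if dados[time][0] > dados[maior][0]:
--             maior = time
--
--     for time in dados.keys():
--         if dados[time][0] == dados[maior][0]:
--             campeao.append(time)
--
--     return campeao
-- ===== SOURCE B (Python) =====
-- def time_campeao(dados):
--     campeoes = []
--     melhor = None
--     for time, placar in dados.items():
--         valor = placar[0]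
--         if melhor is None or valor > melhor:
--             melhor = valor
--             campeoes = [time]
--         elif valor == melhor:
--             campeoes.append(time)
--     return campeoes
-- ===== Notes on version B (the rewrite author's own statement) =====
-- stated objective: simpler
-- what changed: Replaced A's two passes over the dict (find a champion key via lookups d[time][0], then collect all keys tying with it) by a single pass that keeps the best score seen and resets/extends the champion list as it goes, with no repeated dict lookups.
-- intended difference: When a team whose name is the empty string is present, is not the last key, and has a strictly greater score than every other team, A's empty-string sentinel maior collides with that key and A drops it, returning the champions of the keys after it; B returns the empty-string team alone, the true maximum, which is the intended champion list. — e.g. on time_campeao([("", [2]), ("a", [1])]): A returns ["a"], B returns [""]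
import Mathlib
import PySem

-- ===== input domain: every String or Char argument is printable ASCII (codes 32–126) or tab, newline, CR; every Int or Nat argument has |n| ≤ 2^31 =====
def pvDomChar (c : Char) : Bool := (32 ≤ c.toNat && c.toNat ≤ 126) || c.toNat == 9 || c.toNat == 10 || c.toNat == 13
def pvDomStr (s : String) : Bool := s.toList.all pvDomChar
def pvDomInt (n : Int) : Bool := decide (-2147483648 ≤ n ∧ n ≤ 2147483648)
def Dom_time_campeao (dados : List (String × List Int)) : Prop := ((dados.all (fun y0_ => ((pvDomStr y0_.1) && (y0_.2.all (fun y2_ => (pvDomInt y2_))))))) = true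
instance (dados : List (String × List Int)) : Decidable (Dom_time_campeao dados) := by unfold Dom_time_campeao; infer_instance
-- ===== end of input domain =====

-- B replaces A's two passes with dict lookups by a single pass keeping the best score and the current champion list.

-- ===== PORT A =====
-- score[0] of a list (Python l[0]); default never used inside Pre_ (lists are nonempty there)
def pvVal0 (l : List Int) : Int := (PySem.List.pyGet? l 0).getD 0
-- d[k] on the dict: first-match association lookup (keys are unique inside Pre_); the
-- default is never used, since A only looks up keys drawn from the dict itself
def pvLook (dados : List (String × List Int)) (k : String) : List Int :=
  ((dados.find? (fun q => q.1 == k)).getD ("", [])).2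

def time_campeao (dados : List (String × List Int)) : List String :=
  let maior := dados.foldl (fun maior p =>
    let maior := if maior = "" then p.1 else maior
    if pvVal0 (pvLook dados p.1) > pvVal0 (pvLook dados maior) then p.1 else maior) ""
  dados.foldl (fun campeao p =>
    if pvVal0 (pvLook dados p.1) = pvVal0 (pvLook dados maior) then campeao ++ [p.1] else campeao) []

-- ===== PORT B =====
def time_campeao_alt (dados : List (String × List Int)) : List String :=
  (dados.foldl (fun st p =>
      let valor := pvVal0 p.2
      match st.1 with
      | none => (some valor, [p.1])
      | some melhor =>
        if valor > melhor then (some valor, [p.1])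
        else if valor = melhor then (st.1, st.2 ++ [p.1])
        else st)
    ((none : Option Int), ([] : List String))).2

-- ===== PRECONDITION & SPEC =====
-- Pre_ excludes inputs with an empty score list (A raises IndexError on dados[time][0]) and
-- association lists with duplicate keys, which a Python dict argument cannot carry (the dict
-- collapses them to the last value).
def Pre_time_campeao (dados : List (String × List Int)) : Prop :=
  (dados.map Prod.fst).Nodup ∧ ∀ p ∈ dados, p.2 ≠ []
instance (dados : List (String × List Int)) : Decidable (Pre_time_campeao dados) := by
  unfold Pre_time_campeao; infer_instance

def pvWitness_time_campeao : (List (String × List Int)) := [("a", [1]), ("b", [2])]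

-- When a team whose name is the empty string is present, not last, and strictly beats every other
-- team, A's empty-string sentinel maior collides with that key and A returns the champions of the
-- keys after it, while B returns the empty-string team alone — the intended champion list.
def D_time_campeao (dados : List (String × List Int)) : Prop :=
  ∃ q ∈ dados, q.1 = "" ∧ dados.getLast?.map Prod.fst ≠ some "" ∧
    ∀ p ∈ dados, p.1 ≠ "" → p.2.headI < q.2.headI
instance (dados : List (String × List Int)) : Decidable (D_time_campeao dados) := by
  unfold D_time_campeao; infer_instance

def Spec_time_campeao (dados : List (String × List Int)) (out : List String) : Prop :=
  ¬ D_time_campeao dados → out = time_campeao_alt dados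
instance (dados : List (String × List Int)) (out : List String) : Decidable (Spec_time_campeao dados out) := by
  unfold Spec_time_campeao; infer_instance

def pvDiffWitness_time_campeao : (List (String × List Int)) := [("", [2]), ("a", [1])]
def pvDiffWitnessOut_time_campeao : (List String) × (List String) := (["a"], [""])

-- ===== CLAIM (what is proved, stated in full; the proofs are below) =====
def Claim_unchanged_time_campeao : Prop := ∀ (dados : List (String × List Int)), Dom_time_campeao dados → Pre_time_campeao dados → Spec_time_campeao dados (time_campeao dados)
def Claim_changed_time_campeao : Prop := Dom_time_campeao (pvDiffWitness_time_campeao) ∧ Pre_time_campeao (pvDiffWitness_time_campeao) ∧ D_time_campeao (pvDiffWitness_time_campeao) ∧ time_campeao (pvDiffWitness_time_campeao) = pvDiffWitnessOut_time_campeao.1 ∧ time_campeao_alt (pvDiffWitness_time_campeao) = pvDiffWitnessOut_time_campeao.2 ∧ pvDiffWitnessOut_time_campeao.1 ≠ pvDiffWitnessOut_time_campeao.2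
def Claim_exact_time_campeao : Prop := ∀ (dados : List (String × List Int)), Dom_time_campeao dados → Pre_time_campeao dados → D_time_campeao dados → time_campeao dados ≠ time_campeao_alt dados

-- ===== LEMMAS AND PROOFS =====

-- running maximum of v over a list of keys
def pvRmax (v : String → Int) (a : Int) (l : List String) : Int :=
  l.foldl (fun a k => max a (v k)) a

-- one step of A's first loop
def pvAstep (v : String → Int) (m k : String) : String :=
  let m' := if m = "" then k else m
  if v k > v m' then k else m'

-- one step of B's loop, over (key, score) pairs
def pvBstep (st : Option Int × List String) (p : String × Int) : Option Int × List String :=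
  match st.1 with
  | none => (some p.2, [p.1])
  | some melhor =>
    if p.2 > melhor then (some p.2, [p.1])
    else if p.2 = melhor then (st.1, st.2 ++ [p.1])
    else st

theorem pvRmax_nil (v : String → Int) (a : Int) : pvRmax v a [] = a := rfl
theorem pvRmax_cons (v : String → Int) (a : Int) (k : String) (l : List String) :
    pvRmax v a (k :: l) = pvRmax v (max a (v k)) l := rfl
theorem pvRmax_append (v : String → Int) (a : Int) (l1 l2 : List String) :
    pvRmax v a (l1 ++ l2) = pvRmax v (pvRmax v a l1) l2 := List.foldl_append ..

theorem pvRmax_le_self (v : String → Int) (a : Int) (l : List String) : a ≤ pvRmax v a l := by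
  induction l generalizing a with
  | nil => simp [pvRmax_nil]
  | cons k l ih => rw [pvRmax_cons]; exact le_trans (le_max_left _ _) (ih _)

theorem pvRmax_ge_mem (v : String → Int) (a : Int) {k : String} {l : List String} (h : k ∈ l) :
    v k ≤ pvRmax v a l := by
  induction l generalizing a with
  | nil => cases h
  | cons x l ih =>
    rw [pvRmax_cons]
    rcases List.mem_cons.mp h with h | h
    · subst h; exact le_trans (le_max_right _ _) (pvRmax_le_self _ _ _)
    · exact ih _ h

theorem pvRmax_max (v : String → Int) (a b : Int) (l : List String) :
    pvRmax v (max a b) l = max a (pvRmax v b l) := by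
  induction l generalizing b with
  | nil => simp [pvRmax_nil]
  | cons k l ih => rw [pvRmax_cons, pvRmax_cons, max_assoc, ih]

theorem pvAstep_empty (v : String → Int) (k : String) : pvAstep v "" k = k := by
  simp [pvAstep]

-- A's first loop on a run with no "" key, from a non-"" state: stays non-"" and tracks the max
theorem pvAloop_clean (v : String → Int) (l : List String) :
    ∀ m : String, m ≠ "" → "" ∉ l →
      (l.foldl (pvAstep v) m ≠ "" ∧ v (l.foldl (pvAstep v) m) = pvRmax v (v m) l) := by
  induction l with
  | nil => intro m hm _; exact ⟨hm, rfl⟩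
  | cons k l ih =>
    intro m hm hnl
    have hk : k ≠ "" := fun h => hnl (h ▸ List.mem_cons_self ..)
    have hnl' : "" ∉ l := fun h => hnl (List.mem_cons_of_mem _ h)
    have hstep : pvAstep v m k = if v k > v m then k else m := by
      simp [pvAstep, hm]
    rw [List.foldl_cons, pvRmax_cons, hstep]
    by_cases h : v k > v m
    · rw [if_pos h]
      have := ih k hk hnl'
      rw [max_eq_right (le_of_lt h)]
      exact this
    · rw [if_neg h]
      have := ih m hm hnl'
      rw [max_eq_left (by omega)]
      exact this

-- last element of a list with no "" is not ""
theorem pvLast_ne (l : List String) (h : "" ∉ l) (hne : l ≠ []) : l.getLast? ≠ some "" := by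
  intro hc
  have h1 : l.getLast? = some (l.getLast hne) := List.getLast?_eq_some_getLast hne
  rw [h1, Option.some.injEq] at hc
  have hm : l.getLast hne ∈ l := List.getLast_mem hne
  rw [hc] at hm
  exact h hm

-- running maximum of scores over a list of (key, score) pairs
def pvRm (b : Int) (l : List (String × Int)) : Int :=
  l.foldl (fun a p => max a p.2) b

theorem pvRm_cons (b : Int) (p : String × Int) (l : List (String × Int)) :
    pvRm b (p :: l) = pvRm (max b p.2) l := rfl

theorem pvRm_le_self (b : Int) (l : List (String × Int)) : b ≤ pvRm b l := by
  induction l generalizing b with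
  | nil => simp [pvRm]
  | cons p l ih => rw [pvRm_cons]; exact le_trans (le_max_left _ _) (ih _)

-- pvRmax over the keys equals pvRm over the pairs when v agrees with the scores
theorem pvRmax_eq_pvRm (v : String → Int) (l : List (String × Int))
    (hc : ∀ q ∈ l, v q.1 = q.2) : ∀ a, pvRmax v a (l.map Prod.fst) = pvRm a l := by
  induction l with
  | nil => intro a; rfl
  | cons q l ih =>
    intro a
    rw [List.map_cons, pvRmax_cons, pvRm_cons, hc q (List.mem_cons_self ..),
      ih (fun q hq => hc q (List.mem_cons_of_mem _ hq))]

-- characterisation of A's first loop: outside the D_ condition its final value is the global maximum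
theorem pvA_max (v : String → Int) (k0 : String) (rest : List String)
    (hnd : (k0 :: rest).Nodup)
    (hD : ¬("" ∈ (k0 :: rest) ∧ (k0 :: rest).getLast? ≠ some "" ∧
            ∀ k ∈ (k0 :: rest), k ≠ "" → v k < v "")) :
    v ((k0 :: rest).foldl (pvAstep v) "") = pvRmax v (v k0) rest := by
  rw [List.foldl_cons, pvAstep_empty]
  by_cases hk0 : k0 = ""
  · subst hk0
    have hnr : "" ∉ rest := (List.nodup_cons.mp hnd).1
    cases rest with
    | nil => simp [pvRmax_nil]
    | cons k1 rest' =>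
      have hk1 : k1 ≠ "" := fun h => hnr (h ▸ List.mem_cons_self ..)
      have hnr' : "" ∉ rest' := fun h => hnr (List.mem_cons_of_mem _ h)
      rw [List.foldl_cons, pvAstep_empty]
      rw [(pvAloop_clean v rest' k1 hk1 hnr').2]
      -- extract a non-"" witness at least as large as v "" from ¬D_
      have hw : ∃ k ∈ ("" :: k1 :: rest'), k ≠ "" ∧ v "" ≤ v k := by
        by_contra hno
        push_neg at hno
        refine hD ⟨List.mem_cons_self .., ?_, fun k hk hkne => hno k hk hkne⟩
        rw [List.getLast?_cons_cons]
        exact pvLast_ne _ hnr (List.cons_ne_nil _ _)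
      obtain ⟨k, hkmem, hkne, hge⟩ := hw
      have hkmem' : k ∈ k1 :: rest' := by
        rcases List.mem_cons.mp hkmem with h | h
        · exact absurd h hkne
        · exact h
      have hle : v k ≤ pvRmax v (v k1) rest' := by
        rcases List.mem_cons.mp hkmem' with h | h
        · subst h; exact pvRmax_le_self _ _ _
        · exact pvRmax_ge_mem _ _ h
      rw [pvRmax_cons, show max (v "") (v k1) = max (v "") (v k1) from rfl, pvRmax_max,
        max_eq_right (by omega)]
  · have hnd' : rest.Nodup := (List.nodup_cons.mp hnd).2
    by_cases hmem : "" ∈ rest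
    · obtain ⟨l1, l2, hsplit⟩ := List.mem_iff_append.mp hmem
      subst hsplit
      have hna := List.nodup_append.mp hnd'
      have hn1 : "" ∉ l1 := fun h => hna.2.2 "" h "" (List.mem_cons_self ..) rfl
      have hn2 : "" ∉ l2 := (List.nodup_cons.mp hna.2.1).1
      rw [List.foldl_append, List.foldl_cons]
      have hc1 := pvAloop_clean v l1 k0 hk0 hn1
      have hstep : pvAstep v (l1.foldl (pvAstep v) k0) "" =
          if v "" > v (l1.foldl (pvAstep v) k0) then "" else l1.foldl (pvAstep v) k0 := by
        simp [pvAstep, hc1.1]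
      by_cases hgt : v "" > v (l1.foldl (pvAstep v) k0)
      · rw [hstep, if_pos hgt]
        cases l2 with
        | nil =>
          rw [List.foldl_nil, pvRmax_append, pvRmax_cons, pvRmax_nil, ← hc1.2,
            max_eq_right (le_of_lt hgt)]
        | cons k2 l2' =>
          have hk2 : k2 ≠ "" := fun h => hn2 (h ▸ List.mem_cons_self ..)
          have hn2' : "" ∉ l2' := fun h => hn2 (List.mem_cons_of_mem _ h)
          rw [List.foldl_cons, pvAstep_empty, (pvAloop_clean v l2' k2 hk2 hn2').2]
          have hw : ∃ k ∈ (k0 :: (l1 ++ "" :: k2 :: l2')), k ≠ "" ∧ v "" ≤ v k := by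
            by_contra hno
            push_neg at hno
            refine hD ⟨List.mem_cons_of_mem _ (List.mem_append_right _ (List.mem_cons_self ..)),
              ?_, fun k hk hkne => hno k hk hkne⟩
            rw [show k0 :: (l1 ++ "" :: k2 :: l2') = (k0 :: (l1 ++ [""])) ++ (k2 :: l2') by simp,
              List.getLast?_append_of_ne_nil _ (List.cons_ne_nil _ _)]
            exact pvLast_ne _ hn2 (List.cons_ne_nil _ _)
          obtain ⟨k, hkmem, hkne, hge⟩ := hw
          have hle : v k ≤ pvRmax v (v k2) l2' := by
            have hnot : k ∉ k0 :: l1 := by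
              intro hkin
              have : v k ≤ v (l1.foldl (pvAstep v) k0) := by
                rw [hc1.2]
                rcases List.mem_cons.mp hkin with h | h
                · subst h; exact pvRmax_le_self _ _ _
                · exact pvRmax_ge_mem _ _ h
              omega
            have hkin2 : k ∈ k2 :: l2' := by
              rcases List.mem_cons.mp hkmem with h | h
              · exact absurd (h ▸ List.mem_cons_self ..) hnot
              · rcases List.mem_append.mp h with h' | h'
                · exact absurd (List.mem_cons_of_mem _ h') hnot
                · rcases List.mem_cons.mp h' with h'' | h''
                  · exact absurd h'' hkne
                  · exact h''
            rcases List.mem_cons.mp hkin2 with h | h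
            · subst h; exact pvRmax_le_self _ _ _
            · exact pvRmax_ge_mem _ _ h
          rw [pvRmax_append, pvRmax_cons, ← hc1.2, max_eq_right (le_of_lt hgt),
            pvRmax_cons, pvRmax_max, max_eq_right (by omega)]
      · rw [hstep, if_neg hgt]
        rw [(pvAloop_clean v l2 _ hc1.1 hn2).2, pvRmax_append, pvRmax_cons, ← hc1.2,
          max_eq_left (by omega)]
    · exact (pvAloop_clean v rest k0 hk0 hmem).2

-- B's loop invariant
theorem pvB_inv (l : List (String × Int)) :
    ∀ (b : Int) (cs : List String),
      l.foldl pvBstep (some b, cs) =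
        (some (pvRm b l),
         if pvRm b l = b
         then cs ++ (l.filter (fun p => p.2 = b)).map Prod.fst
         else (l.filter (fun p => p.2 = pvRm b l)).map Prod.fst) := by
  induction l with
  | nil => intro b cs; simp [pvRm]
  | cons p l ih =>
    intro b cs
    rw [List.foldl_cons, pvRm_cons]
    by_cases h1 : p.2 > b
    · have hs : pvBstep (some b, cs) p = (some p.2, [p.1]) := by simp [pvBstep, h1]
      rw [hs, ih, max_eq_right (le_of_lt h1)]
      have hRb : ¬ (pvRm p.2 l = b) := by have := pvRm_le_self p.2 l; omega
      rw [if_neg hRb]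
      by_cases hR : pvRm p.2 l = p.2
      · rw [if_pos hR, List.filter_cons, if_pos (by simp [hR]), List.map_cons, hR]
        simp
      · rw [if_neg hR, List.filter_cons, if_neg (by simp; omega)]
    · by_cases h2 : p.2 = b
      · have hs : pvBstep (some b, cs) p = (some b, cs ++ [p.1]) := by simp [pvBstep, h2]
        rw [hs, ih, show max b p.2 = b by omega]
        by_cases hR : pvRm b l = b
        · rw [if_pos hR, if_pos hR, List.filter_cons, if_pos (by simp [h2]), List.map_cons,
            List.append_assoc]
          rfl
        · rw [if_neg hR, if_neg hR, List.filter_cons, if_neg (by simp; omega)]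
      · have hs : pvBstep (some b, cs) p = (some b, cs) := by simp [pvBstep, h1, h2]
        rw [hs, ih, show max b p.2 = b by omega]
        by_cases hR : pvRm b l = b
        · rw [if_pos hR, if_pos hR, List.filter_cons, if_neg (by simp; omega)]
        · have := pvRm_le_self b l
          rw [if_neg hR, if_neg hR, List.filter_cons, if_neg (by simp; omega)]

-- B's output on a nonempty pair list
theorem pvB_out (q0 : String × Int) (l : List (String × Int)) :
    ((q0 :: l).foldl pvBstep ((none : Option Int), ([] : List String))).2 =
      ((q0 :: l).filter (fun q => q.2 = pvRm q0.2 l)).map Prod.fst := by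
  have h0 : pvBstep ((none : Option Int), ([] : List String)) q0 = (some q0.2, [q0.1]) := rfl
  rw [List.foldl_cons, h0, pvB_inv]
  by_cases hR : pvRm q0.2 l = q0.2
  · rw [if_pos hR, List.filter_cons, if_pos (by simp [hR]), List.map_cons, hR]
    simp
  · have := pvRm_le_self q0.2 l
    rw [if_neg hR, List.filter_cons, if_neg (by simp; omega)]

-- under unique keys, A's dict lookup of a present key returns that pair's value
theorem pvLook_mem (dados : List (String × List Int)) (hnd : (dados.map Prod.fst).Nodup) :
    ∀ p ∈ dados, pvLook dados p.1 = p.2 := by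
  induction dados with
  | nil => intro p hp; cases hp
  | cons q rest ih =>
    intro p hp
    rcases List.mem_cons.mp hp with h | h
    · subst h; simp [pvLook]
    · have hne : ¬ (q.1 == p.1) = true := by
        simp only [beq_iff_eq]
        intro hq
        exact (List.nodup_cons.mp (by simpa using hnd)).1
          (hq ▸ List.mem_map_of_mem (f := Prod.fst) h)
      have : pvLook (q :: rest) p.1 = pvLook rest p.1 := by
        simp [pvLook, hne]
      rw [this]
      exact ih (by simpa using (List.nodup_cons.mp (by simpa using hnd)).2) p h

-- a fold that conditionally appends is a filter
theorem pvFoldFilter {α β : Type} (P : α → Prop) [DecidablePred P] (f : α → β) (l : List α) :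
    ∀ acc : List β,
      l.foldl (fun acc x => if P x then acc ++ [f x] else acc) acc =
        acc ++ (l.filter (fun x => decide (P x))).map f := by
  induction l with
  | nil => intro acc; simp
  | cons x l ih =>
    intro acc
    rw [List.foldl_cons, List.filter_cons]
    by_cases h : P x
    · rw [if_pos h, if_pos (by simpa using h), ih, List.map_cons]
      simp
    · rw [if_neg h, if_neg (by simpa using h), ih]

-- headI agrees with the Python l[0] read on nonempty lists
theorem pvHeadI (l : List Int) (h : l ≠ []) : l.headI = pvVal0 l := by
  cases l with
  | nil => exact absurd rfl h
  | cons a t => simp [pvVal0]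

-- ===== VERDICT (by name: the statement is the Claim_ definition above) =====
theorem time_campeao_spec : Claim_unchanged_time_campeao := by
  intro dados _hdom hpre hnD
  cases dados with
  | nil => rfl
  | cons p0 rest =>
    set dados := p0 :: rest with hdados
    obtain ⟨hnd, hvne⟩ := hpre
    -- v : the score A reads for a key through the dict lookup
    set v : String → Int := fun k => pvVal0 (pvLook dados k) with hv
    have hcomp : ∀ p ∈ dados, v p.1 = pvVal0 p.2 := by
      intro p hp
      rw [hv]
      simp only
      rw [pvLook_mem dados hnd p hp]
    -- A's first loop over the keys
    have hAfold : dados.foldl (fun maior p =>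
        let maior := if maior = "" then p.1 else maior
        if pvVal0 (pvLook dados p.1) > pvVal0 (pvLook dados maior) then p.1 else maior) "" =
        (dados.map Prod.fst).foldl (pvAstep v) "" := by
      rw [List.foldl_map]
      rfl
    -- its final value is the global maximum (uses ¬ D_)
    have hkeys : dados.map Prod.fst = p0.1 :: rest.map Prod.fst := by rfl
    have hDk : ¬("" ∈ (p0.1 :: rest.map Prod.fst) ∧
        (p0.1 :: rest.map Prod.fst).getLast? ≠ some "" ∧
        ∀ k ∈ (p0.1 :: rest.map Prod.fst), k ≠ "" → v k < v "") := by
      intro ⟨h1, h2, h3⟩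
      obtain ⟨q, hq, hq1⟩ := List.mem_map.mp (show "" ∈ dados.map Prod.fst by rw [hkeys]; exact h1)
      refine hnD ⟨q, hq, hq1, ?_, ?_⟩
      · rw [← List.getLast?_map, hkeys]
        exact h2
      · intro p hp hpne
        have hlt := h3 p.1 (by rw [← hkeys]; exact List.mem_map_of_mem hp) hpne
        have e1 : p.2.headI = v p.1 := by
          rw [hcomp p hp, pvHeadI p.2 (hvne p hp)]
        have e2 : q.2.headI = v "" := by
          have hlk : pvLook dados "" = q.2 := by rw [← hq1]; exact pvLook_mem dados hnd q hq
          rw [hv]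
          simp only
          rw [hlk, pvHeadI q.2 (hvne q hq)]
        rw [e1, e2]
        exact hlt
    have hmaior : v (dados.foldl (fun maior p =>
        let maior := if maior = "" then p.1 else maior
        if pvVal0 (pvLook dados p.1) > pvVal0 (pvLook dados maior) then p.1 else maior) "") =
        pvRmax v (v p0.1) (rest.map Prod.fst) := by
      rw [hAfold, hkeys]
      exact pvA_max v p0.1 (rest.map Prod.fst) (by rw [← hkeys]; exact hnd) hDk
    -- the maximum, expressed over the pairs B folds
    set L : List (String × Int) := dados.map (fun p => (p.1, pvVal0 p.2)) with hL
    have hcompL : ∀ q ∈ rest.map (fun p => (p.1, pvVal0 p.2)), v q.1 = q.2 := by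
      intro q hq
      obtain ⟨p, hp, hpq⟩ := List.mem_map.mp hq
      subst hpq
      exact hcomp p (List.mem_cons_of_mem _ hp)
    have hM : pvRmax v (v p0.1) (rest.map Prod.fst) =
        pvRm (pvVal0 p0.2) (rest.map (fun p => (p.1, pvVal0 p.2))) := by
      have h1 : rest.map Prod.fst = (rest.map (fun p => (p.1, pvVal0 p.2))).map Prod.fst := by
        simp
      rw [h1, pvRmax_eq_pvRm v _ hcompL, hcomp p0 (List.mem_cons_self ..)]
    -- B's side
    have hBfold : time_campeao_alt dados =
        (L.foldl pvBstep ((none : Option Int), ([] : List String))).2 := by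
      rw [time_campeao_alt, hL, List.foldl_map]
      rfl
    set M : Int := pvRm (pvVal0 p0.2) (rest.map (fun p => (p.1, pvVal0 p.2))) with hMdef
    have hB : time_campeao_alt dados =
        (dados.filter (fun p => decide (pvVal0 p.2 = M))).map Prod.fst := by
      rw [hBfold, hL]
      rw [show dados.map (fun p => (p.1, pvVal0 p.2)) =
        (p0.1, pvVal0 p0.2) :: rest.map (fun p => (p.1, pvVal0 p.2)) from rfl]
      rw [pvB_out]
      rw [show ((p0.1, pvVal0 p0.2) :: rest.map (fun p => (p.1, pvVal0 p.2))) =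
        dados.map (fun p => (p.1, pvVal0 p.2)) from rfl]
      rw [List.filter_map, List.map_map]
      rfl
    -- A's second loop is a filter with the same predicate
    show time_campeao dados = time_campeao_alt dados
    rw [time_campeao]
    simp only
    rw [pvFoldFilter (fun p => pvVal0 (pvLook dados p.1) = pvVal0 (pvLook dados _)) Prod.fst]
    rw [List.nil_append, hB]
    congr 1
    apply List.filter_congr
    intro p hp
    simp only [decide_eq_decide]
    have h1 : pvVal0 (pvLook dados p.1) = pvVal0 p.2 := hcomp p hp
    have h2 : pvVal0 (pvLook dados (dados.foldl (fun maior p =>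
        let maior := if maior = "" then p.1 else maior
        if pvVal0 (pvLook dados p.1) > pvVal0 (pvLook dados maior) then p.1 else maior) "")) = M := by
      have := hmaior
      rw [hv] at this
      simp only at this
      rw [this, ← hM]
    rw [h1, h2]

theorem time_campeao_changed : Claim_changed_time_campeao := by
  unfold Claim_changed_time_campeao; decide

-- bounds on the running maximum, used by the tightness theorem
theorem pvRmax_lt (v : String → Int) (c : Int) (l : List String) :
    ∀ a : Int, a < c → (∀ k ∈ l, v k < c) → pvRmax v a l < c := by
  induction l with
  | nil => intro a ha _; exact ha
  | cons k l ih =>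
    intro a ha h
    rw [pvRmax_cons]
    exact ih _ (max_lt ha (h k (List.mem_cons_self ..))) (fun x hx => h x (List.mem_cons_of_mem _ hx))

theorem pvRmax_le (v : String → Int) (c : Int) (l : List String) :
    ∀ a : Int, a ≤ c → (∀ k ∈ l, v k ≤ c) → pvRmax v a l ≤ c := by
  induction l with
  | nil => intro a ha _; exact ha
  | cons k l ih =>
    intro a ha h
    rw [pvRmax_cons]
    exact ih _ (max_le ha (h k (List.mem_cons_self ..))) (fun x hx => h x (List.mem_cons_of_mem _ hx))

-- inside the D_ condition, A's first loop ends strictly below the score of the "" key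
theorem pvA_lt (v : String → Int) (k0 : String) (rest : List String)
    (hnd : (k0 :: rest).Nodup)
    (hin : "" ∈ (k0 :: rest))
    (hlast : (k0 :: rest).getLast? ≠ some "")
    (hsm : ∀ k ∈ (k0 :: rest), k ≠ "" → v k < v "") :
    v ((k0 :: rest).foldl (pvAstep v) "") < v "" := by
  rw [List.foldl_cons, pvAstep_empty]
  by_cases hk0 : k0 = ""
  · subst hk0
    have hnr : "" ∉ rest := (List.nodup_cons.mp hnd).1
    cases rest with
    | nil => exact absurd rfl hlast
    | cons k1 rest' =>
      have hk1 : k1 ≠ "" := fun h => hnr (h ▸ List.mem_cons_self ..)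
      have hnr' : "" ∉ rest' := fun h => hnr (List.mem_cons_of_mem _ h)
      rw [List.foldl_cons, pvAstep_empty, (pvAloop_clean v rest' k1 hk1 hnr').2]
      exact pvRmax_lt v (v "") rest' (v k1)
        (hsm k1 (List.mem_cons_of_mem _ (List.mem_cons_self ..)) hk1)
        (fun x hx => hsm x (List.mem_cons_of_mem _ (List.mem_cons_of_mem _ hx))
          (fun h => hnr' (h ▸ hx)))
  · have hnd' : rest.Nodup := (List.nodup_cons.mp hnd).2
    have hmem : "" ∈ rest := by
      rcases List.mem_cons.mp hin with h | h
      · exact absurd h.symm hk0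
      · exact h
    obtain ⟨l1, l2, hsplit⟩ := List.mem_iff_append.mp hmem
    subst hsplit
    have hna := List.nodup_append.mp hnd'
    have hn1 : "" ∉ l1 := fun h => hna.2.2 "" h "" (List.mem_cons_self ..) rfl
    have hn2 : "" ∉ l2 := (List.nodup_cons.mp hna.2.1).1
    rw [List.foldl_append, List.foldl_cons]
    have hc1 := pvAloop_clean v l1 k0 hk0 hn1
    have hlt1 : v (l1.foldl (pvAstep v) k0) < v "" := by
      rw [hc1.2]
      exact pvRmax_lt v (v "") l1 (v k0) (hsm k0 (List.mem_cons_self ..) hk0)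
        (fun x hx => hsm x (List.mem_cons_of_mem _ (List.mem_append_left _ hx))
          (fun h => hn1 (h ▸ hx)))
    have hstep : pvAstep v (l1.foldl (pvAstep v) k0) "" = "" := by
      simp [pvAstep, hc1.1, hlt1]
    rw [hstep]
    cases l2 with
    | nil =>
      exact absurd (by
        rw [show k0 :: (l1 ++ [""]) = (k0 :: l1) ++ [""] by simp,
          List.getLast?_append_of_ne_nil _ (List.cons_ne_nil _ _)]
        rfl) hlast
    | cons k2 l2' =>
      have hk2 : k2 ≠ "" := fun h => hn2 (h ▸ List.mem_cons_self ..)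
      have hn2' : "" ∉ l2' := fun h => hn2 (List.mem_cons_of_mem _ h)
      rw [List.foldl_cons, pvAstep_empty, (pvAloop_clean v l2' k2 hk2 hn2').2]
      exact pvRmax_lt v (v "") l2' (v k2)
        (hsm k2 (List.mem_cons_of_mem _ (List.mem_append_right _
          (List.mem_cons_of_mem _ (List.mem_cons_self ..)))) hk2)
        (fun x hx => hsm x (List.mem_cons_of_mem _ (List.mem_append_right _
          (List.mem_cons_of_mem _ (List.mem_cons_of_mem _ hx))))
          (fun h => hn2' (h ▸ hx)))

theorem time_campeao_tight : Claim_exact_time_campeao := by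
  intro dados _hdom hpre hD
  cases dados with
  | nil => obtain ⟨q, hq, -⟩ := hD; cases hq
  | cons p0 rest =>
    set dados := p0 :: rest with hdados
    obtain ⟨hnd, hvne⟩ := hpre
    obtain ⟨q, hq, hq1, hlast, hsmall⟩ := hD
    set v : String → Int := fun k => pvVal0 (pvLook dados k) with hv
    have hcomp : ∀ p ∈ dados, v p.1 = pvVal0 p.2 := by
      intro p hp
      rw [hv]
      simp only
      rw [pvLook_mem dados hnd p hp]
    have hvq : v "" = pvVal0 q.2 := by
      rw [← hq1]; exact hcomp q hq
    -- key-form facts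
    have hkeys : dados.map Prod.fst = p0.1 :: rest.map Prod.fst := by rfl
    have hin : "" ∈ p0.1 :: rest.map Prod.fst := by
      rw [← hkeys]
      exact hq1 ▸ List.mem_map_of_mem hq
    have hlastk : (p0.1 :: rest.map Prod.fst).getLast? ≠ some "" := by
      rw [← hkeys, List.getLast?_map]
      intro hc
      exact hlast (by rw [hc])
    have hsm : ∀ k ∈ (p0.1 :: rest.map Prod.fst), k ≠ "" → v k < v "" := by
      intro k hk hkne
      obtain ⟨p, hp, hp1⟩ := List.mem_map.mp (show k ∈ dados.map Prod.fst by rw [hkeys]; exact hk)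
      have := hsmall p hp (hp1.symm ▸ hkne)
      rw [pvHeadI p.2 (hvne p hp), pvHeadI q.2 (hvne q hq)] at this
      rw [← hp1, hcomp p hp, hvq]
      exact this
    -- A's first loop ends strictly below v ""
    have hAfold : dados.foldl (fun maior p =>
        let maior := if maior = "" then p.1 else maior
        if pvVal0 (pvLook dados p.1) > pvVal0 (pvLook dados maior) then p.1 else maior) "" =
        (dados.map Prod.fst).foldl (pvAstep v) "" := by
      rw [List.foldl_map]
      rfl
    have hlt : v (dados.foldl (fun maior p =>
        let maior := if maior = "" then p.1 else maior
        if pvVal0 (pvLook dados p.1) > pvVal0 (pvLook dados maior) then p.1 else maior) "") < v "" := by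
      rw [hAfold, hkeys]
      exact pvA_lt v p0.1 (rest.map Prod.fst) (by rw [← hkeys]; exact hnd) hin hlastk hsm
    -- B's output and its maximum
    set L : List (String × Int) := dados.map (fun p => (p.1, pvVal0 p.2)) with hL
    have hcompL : ∀ x ∈ rest.map (fun p => (p.1, pvVal0 p.2)), v x.1 = x.2 := by
      intro x hx
      obtain ⟨p, hp, hpx⟩ := List.mem_map.mp hx
      subst hpx
      exact hcomp p (List.mem_cons_of_mem _ hp)
    set M : Int := pvRm (pvVal0 p0.2) (rest.map (fun p => (p.1, pvVal0 p.2))) with hMdef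
    have hM : pvRmax v (v p0.1) (rest.map Prod.fst) = M := by
      have h1 : rest.map Prod.fst = (rest.map (fun p => (p.1, pvVal0 p.2))).map Prod.fst := by
        simp
      rw [h1, pvRmax_eq_pvRm v _ hcompL, hcomp p0 (List.mem_cons_self ..)]
    have hMv : M = v "" := by
      rw [← hM]
      apply le_antisymm
      · apply pvRmax_le
        · by_cases h : p0.1 = ""
          · rw [h]
          · exact le_of_lt (hsm p0.1 (List.mem_cons_self ..) h)
        · intro k hk
          by_cases h : k = ""
          · rw [h]
          · exact le_of_lt (hsm k (List.mem_cons_of_mem _ hk) h)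
      · rcases List.mem_cons.mp hin with h | h
        · rw [← h]
          exact pvRmax_le_self _ _ _
        · exact pvRmax_ge_mem _ _ h
    have hBfold : time_campeao_alt dados =
        (L.foldl pvBstep ((none : Option Int), ([] : List String))).2 := by
      rw [time_campeao_alt, hL, List.foldl_map]
      rfl
    have hB : time_campeao_alt dados =
        (dados.filter (fun p => decide (pvVal0 p.2 = M))).map Prod.fst := by
      rw [hBfold, hL]
      rw [show dados.map (fun p => (p.1, pvVal0 p.2)) =
        (p0.1, pvVal0 p0.2) :: rest.map (fun p => (p.1, pvVal0 p.2)) from rfl]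
      rw [pvB_out]
      rw [show ((p0.1, pvVal0 p0.2) :: rest.map (fun p => (p.1, pvVal0 p.2))) =
        dados.map (fun p => (p.1, pvVal0 p.2)) from rfl]
      rw [List.filter_map, List.map_map]
      rfl
    -- "" is in B's output
    have hBin : "" ∈ time_campeao_alt dados := by
      rw [hB]
      refine List.mem_map.mpr ⟨q, List.mem_filter.mpr ⟨hq, ?_⟩, hq1⟩
      simp only [decide_eq_true_eq]
      rw [hMv, hvq]
    -- "" is not in A's output, since A's champion score is strictly below v ""
    have hA : time_campeao dados =
        (dados.filter (fun p => decide (pvVal0 (pvLook dados p.1) =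
          pvVal0 (pvLook dados (dados.foldl (fun maior p =>
            let maior := if maior = "" then p.1 else maior
            if pvVal0 (pvLook dados p.1) > pvVal0 (pvLook dados maior) then p.1 else maior)
            ""))))).map Prod.fst := by
      rw [time_campeao]
      simp only
      rw [pvFoldFilter (fun p => pvVal0 (pvLook dados p.1) = pvVal0 (pvLook dados _)) Prod.fst,
        List.nil_append]
    have hnotin : "" ∉ time_campeao dados := by
      rw [hA]
      intro hcon
      obtain ⟨p, hpf, hp1⟩ := List.mem_map.mp hcon
      obtain ⟨_, hdec⟩ := List.mem_filter.mp hpf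
      have h2 := of_decide_eq_true hdec
      rw [hp1] at h2
      have hlt' : pvVal0 (pvLook dados (dados.foldl (fun maior p =>
          let maior := if maior = "" then p.1 else maior
          if pvVal0 (pvLook dados p.1) > pvVal0 (pvLook dados maior) then p.1 else maior) "")) <
          pvVal0 (pvLook dados "") := hlt
      omega
    exact fun heq => hnotin (heq ▸ hBin)
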